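-- pv_equiv track=rewrite | github.com/ishan090/Codewars_ProjectEuler | projectEuler/pythagorean_triplets.py | list_triplets
-- ===== SOURCE A (Python) =====
-- def list_triplets(x):
--     triplets = []
--     m = 2
--     n = 1
--     while len(triplets) + 1 <= x:
--         triplets.append((m, n, 2*m*n, m*m - n*n, m*m + n*n))
--         if n + 1 < m:
--             n += 1
--         else:
--             m += 1
--             n = 1
--     return triplets
-- ===== SOURCE B (Python) =====
-- def _isqrt(k):
--     # Newton's method for integer square root (k >= 1)
--     if k == 0:
--         return 0
--     r = k
--     s = (r + 1) // 2
--     while s < r: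
--         r = s
--         s = (r + k // r) // 2
--     return r
--
--
-- def list_triplets(x):
--     # position i maps directly to its (m, n) pair by inverting the
--     # triangular cumulative count of pairs with smaller m
--     res = []
--     i = 0
--     while i < x:
--         m = (3 + _isqrt(8 * i + 1)) // 2
--         n = i - (m - 2) * (m - 1) // 2 + 1
--         res.append((m, n, 2 * m * n, m * m - n * n, m * m + n * n))
--         i += 1
--     return res
-- ===== Notes on version B (the rewrite author's own statement) =====
-- stated objective: alternative
-- what changed: Replaces A's per-step (m,n) state machine (increment n or reset n and bump m) by a closed-form map from each position i to its pair via a Newton integer square root: m = (3 + isqrt(8i+1))//2 inverts the triangular cumulative count and n = i - (m-2)(m-1)//2 + 1.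
import Mathlib
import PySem

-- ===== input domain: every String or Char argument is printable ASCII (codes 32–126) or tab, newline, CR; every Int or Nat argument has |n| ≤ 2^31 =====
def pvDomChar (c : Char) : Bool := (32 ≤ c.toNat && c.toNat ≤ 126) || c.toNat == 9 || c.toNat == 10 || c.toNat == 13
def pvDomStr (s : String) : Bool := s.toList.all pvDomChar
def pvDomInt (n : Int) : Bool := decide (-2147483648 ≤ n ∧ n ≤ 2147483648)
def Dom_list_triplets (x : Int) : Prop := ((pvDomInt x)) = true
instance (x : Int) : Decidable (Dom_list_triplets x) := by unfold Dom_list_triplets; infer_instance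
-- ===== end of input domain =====

-- B replaces A's per-step (m,n) state machine by a closed-form map from the position i to its
-- pair: m = (3 + isqrt(8i+1))//2 inverts the triangular cumulative count (Newton integer sqrt,
-- since A imports no math module); objective: alternative algorithm, same output.

-- ===== PORT A =====
-- while len(triplets)+1 <= x: append; advance (m,n).  Fuel x.toNat bounds the loop:
-- every iteration that passes the test appends exactly one element.
def pvALoop (x : Int) : Nat → Int → Int → List (Int × Int × Int × Int × Int) → List (Int × Int × Int × Int × Int)
  | 0, _, _, acc => acc
  | f+1, m, n, acc =>
    if (acc.length : Int) + 1 ≤ x then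
      let acc' := acc ++ [(m, n, 2*m*n, m*m - n*n, m*m + n*n)]
      if n + 1 < m then pvALoop x f m (n+1) acc'
      else pvALoop x f (m+1) 1 acc'
    else acc

def list_triplets (x : Int) : List (Int × Int × Int × Int × Int) :=
  pvALoop x x.toNat 2 1 []

-- ===== PORT B =====
-- _isqrt's Newton loop: while s < r: r = s; s = (r + k//r)//2.  Fuel k.toNat bounds it:
-- r strictly decreases and stays nonnegative on the inputs _isqrt passes in.
def pvNewtonLoop (k : Int) : Nat → Int → Int → Int
  | 0, r, _ => r
  | f+1, r, s =>
    if s < r then pvNewtonLoop k f s (PySem.Int.floordiv (s + PySem.Int.floordiv k s) 2)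
    else r

def pvIsqrt (k : Int) : Int :=
  if k = 0 then 0
  else pvNewtonLoop k k.toNat k (PySem.Int.floordiv (k + 1) 2)

-- while i < x: compute (m, n) from i in closed form, append, i += 1.  Fuel x.toNat bounds it.
def pvBLoop (x : Int) : Nat → Int → List (Int × Int × Int × Int × Int) → List (Int × Int × Int × Int × Int)
  | 0, _, acc => acc
  | f+1, i, acc =>
    if i < x then
      let m := PySem.Int.floordiv (3 + pvIsqrt (8*i + 1)) 2
      let n := i - PySem.Int.floordiv ((m - 2) * (m - 1)) 2 + 1
      pvBLoop x f (i+1) (acc ++ [(m, n, 2*m*n, m*m - n*n, m*m + n*n)])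
    else acc

def list_triplets_alt (x : Int) : List (Int × Int × Int × Int × Int) :=
  pvBLoop x x.toNat 0 []

-- ===== PRECONDITION & SPEC =====
def Spec_list_triplets (x : Int) (out : List (Int × Int × Int × Int × Int)) : Prop := out = list_triplets_alt x
instance (x : Int) (out : List (Int × Int × Int × Int × Int)) : Decidable (Spec_list_triplets x out) := by unfold Spec_list_triplets; infer_instance

-- ===== CLAIM (what is proved, stated in full; the proofs are below) =====
def Claim_equal_list_triplets : Prop := ∀ (x : Int), Dom_list_triplets x → Spec_list_triplets x (list_triplets x)

-- ===== LEMMAS AND PROOFS =====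

-- the integer square root B's closed form is about, as an Int
def pvS0 (k : Int) : Int := (Nat.sqrt k.toNat : Int)

-- B's closed-form (m, n) pair for position i
def pvPair (i : Int) : Int × Int :=
  let m := PySem.Int.floordiv (3 + pvIsqrt (8*i + 1)) 2
  let n := i - PySem.Int.floordiv ((m - 2) * (m - 1)) 2 + 1
  (m, n)

def pvTrip (m n : Int) : Int × Int × Int × Int × Int := (m, n, 2*m*n, m*m - n*n, m*m + n*n)

-- the triplets for positions i, i+1, …, i+c-1
def pvTail (i : Int) : Nat → List (Int × Int × Int × Int × Int)
  | 0 => []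
  | c+1 => pvTrip (pvPair i).1 (pvPair i).2 :: pvTail (i+1) c

lemma pvS0_sq_le (k : Int) (hk : 0 ≤ k) : pvS0 k * pvS0 k ≤ k := by
  have h : Nat.sqrt k.toNat * Nat.sqrt k.toNat ≤ k.toNat := by
    have := Nat.sqrt_le' k.toNat
    simpa [pow_two] using this
  have : ((Nat.sqrt k.toNat * Nat.sqrt k.toNat : Nat) : Int) ≤ (k.toNat : Int) := by exact_mod_cast h
  simpa [pvS0, Int.toNat_of_nonneg hk] using this

lemma pvS0_lt_sq (k : Int) (hk : 0 ≤ k) : k < (pvS0 k + 1) * (pvS0 k + 1) := by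
  have h : k.toNat < (Nat.sqrt k.toNat + 1) * (Nat.sqrt k.toNat + 1) := by
    have := Nat.lt_succ_sqrt' k.toNat
    simpa [pow_two, Nat.succ_eq_add_one] using this
  have : ((k.toNat : Nat) : Int) < (((Nat.sqrt k.toNat + 1) * (Nat.sqrt k.toNat + 1) : Nat) : Int) := by
    exact_mod_cast h
  simpa [pvS0, Int.toNat_of_nonneg hk] using this

lemma pvS0_pos (k : Int) (hk : 1 ≤ k) : 1 ≤ pvS0 k := by
  have h := pvS0_lt_sq k (by omega)
  have h0 : 0 ≤ pvS0 k := by simp [pvS0]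
  nlinarith

-- AM-GM step: the Newton iterate never drops below the integer square root
lemma pvNewton_ge (k a : Int) (hk : 1 ≤ k) (ha : 1 ≤ a) :
    pvS0 k ≤ PySem.Int.floordiv (a + PySem.Int.floordiv k a) 2 := by
  have hsq := pvS0_sq_le k (by omega)
  have hs0 := pvS0_pos k hk
  rw [PySem.Int.le_floordiv_iff_mul_le (by norm_num)]
  by_cases hcase : pvS0 k * 2 - a ≤ 0
  · have hfd : 0 ≤ PySem.Int.floordiv k a := by
      rw [PySem.Int.le_floordiv_iff_mul_le (by omega)]; omega
    omega
  · have h2 : pvS0 k * 2 - a ≤ PySem.Int.floordiv k a := by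
      rw [PySem.Int.le_floordiv_iff_mul_le (by omega)]
      nlinarith [sq_nonneg (pvS0 k - a)]
    omega

-- exit condition: r ≤ next(r) forces r ≤ isqrt k
lemma pvNewton_exit (k r : Int) (hk : 1 ≤ k) (hr : 1 ≤ r)
    (h : r ≤ PySem.Int.floordiv (r + PySem.Int.floordiv k r) 2) : r ≤ pvS0 k := by
  have h1 : r * 2 ≤ r + PySem.Int.floordiv k r := by
    rw [PySem.Int.le_floordiv_iff_mul_le (by norm_num)] at h; omega
  have h2 : r ≤ PySem.Int.floordiv k r := by omega
  have h3 : r * r ≤ k := by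
    rw [PySem.Int.le_floordiv_iff_mul_le (by omega)] at h2; exact h2
  have h4 : r.toNat ≤ Nat.sqrt k.toNat := by
    rw [Nat.le_sqrt', pow_two]
    have : (↑(r.toNat * r.toNat) : Int) ≤ (k.toNat : Int) := by
      rw [Int.toNat_of_nonneg (by omega : (0:Int) ≤ k)]
      push_cast
      rw [Int.toNat_of_nonneg (by omega : (0:Int) ≤ r)]
      exact h3
    exact_mod_cast this
  have : (r.toNat : Int) ≤ (Nat.sqrt k.toNat : Int) := by exact_mod_cast h4
  simpa [pvS0, Int.toNat_of_nonneg (by omega : (0:Int) ≤ r)] using this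

lemma pvNewtonLoop_eq (k : Int) (hk : 1 ≤ k) :
    ∀ (f : Nat) (r : Int), pvS0 k ≤ r → r.toNat ≤ f + (pvS0 k).toNat →
      pvNewtonLoop k f r (PySem.Int.floordiv (r + PySem.Int.floordiv k r) 2) = pvS0 k := by
  intro f
  induction f with
  | zero =>
    intro r hr hf
    have hs0 := pvS0_pos k hk
    have : r = pvS0 k := by omega
    simp [pvNewtonLoop, this]
  | succ f ih =>
    intro r hr hf
    have hs0 := pvS0_pos k hk
    have hr1 : 1 ≤ r := by omega
    rw [pvNewtonLoop]
    by_cases h : PySem.Int.floordiv (r + PySem.Int.floordiv k r) 2 < r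
    · rw [if_pos h]
      have hge := pvNewton_ge k r hk hr1
      exact ih _ hge (by omega)
    · rw [if_neg h]
      have := pvNewton_exit k r hk hr1 (by omega)
      omega

lemma pvIsqrt_eq (k : Int) (hk : 1 ≤ k) : pvIsqrt k = pvS0 k := by
  have hkk : PySem.Int.floordiv k k = 1 := by
    rw [PySem.Int.floordiv_eq_iff_of_pos (by omega)]; omega
  have hinit : PySem.Int.floordiv (k + 1) 2
      = PySem.Int.floordiv (k + PySem.Int.floordiv k k) 2 := by rw [hkk]
  have hself : pvS0 k ≤ k := by
    have h1 := pvS0_sq_le k (by omega)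
    have h2 := pvS0_pos k hk
    nlinarith
  rw [pvIsqrt, if_neg (by omega : ¬ k = 0), hinit]
  exact pvNewtonLoop_eq k hk k.toNat k hself (by omega)

-- characterisation: pvPair i is the unique (m, n) with 2 ≤ m, 1 ≤ n < m and
-- 2i = (m-2)(m-1) + 2(n-1)
lemma pvPair_char (i : Int) (hi : 0 ≤ i) :
    2 ≤ (pvPair i).1 ∧ 1 ≤ (pvPair i).2 ∧ (pvPair i).2 < (pvPair i).1 ∧
      2*i = ((pvPair i).1 - 2) * ((pvPair i).1 - 1) + 2*((pvPair i).2 - 1) := by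
  have hk : (1:Int) ≤ 8*i + 1 := by omega
  have ht : pvIsqrt (8*i + 1) = pvS0 (8*i + 1) := pvIsqrt_eq _ hk
  set t := pvS0 (8*i + 1) with htdef
  have ht1 : 1 ≤ t := pvS0_pos _ hk
  have htsq : t * t ≤ 8*i + 1 := pvS0_sq_le _ (by omega)
  have htsq' : 8*i + 1 < (t + 1) * (t + 1) := pvS0_lt_sq _ (by omega)
  show 2 ≤ (pvPair i).1 ∧ _
  rw [pvPair]
  simp only [ht]
  set m := PySem.Int.floordiv (3 + t) 2 with hmdef
  have hmb : m * 2 ≤ 3 + t ∧ 3 + t < (m + 1) * 2 := by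
    rw [← PySem.Int.floordiv_eq_iff_of_pos (by norm_num)]
  have hm2 : 2 ≤ m := by omega
  obtain ⟨c, hc⟩ : ∃ c, (m - 2) * (m - 1) = 2 * c := by
    rcases Int.even_mul_succ_self (m - 2) with ⟨c, hc⟩
    exact ⟨c, by linarith [hc]⟩
  have hfd : PySem.Int.floordiv ((m - 2) * (m - 1)) 2 = c := by
    rw [PySem.Int.floordiv_eq_iff_of_pos (by norm_num)]; omega
  simp only [hfd]
  have hlow : (m - 2) * (m - 1) ≤ 2 * i := by
    have h1 : (2*m - 3) * (2*m - 3) ≤ t * t := by nlinarith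
    nlinarith
  have hhigh : 2 * i < (m - 1) * m := by
    have h1 : (t + 1) * (t + 1) ≤ (2*m - 1) * (2*m - 1) := by nlinarith
    nlinarith
  have hprod : (m - 1) * m = (m - 2) * (m - 1) + 2 * (m - 1) := by ring
  refine ⟨hm2, by omega, by omega, by omega⟩

lemma pvPair_uniq (i m n m' n' : Int)
    (h1 : 2 ≤ m) (h2 : 1 ≤ n) (h3 : n < m) (h4 : 2*i = (m - 2)*(m - 1) + 2*(n - 1))
    (h1' : 2 ≤ m') (h2' : 1 ≤ n') (h3' : n' < m') (h4' : 2*i = (m' - 2)*(m' - 1) + 2*(n' - 1)) :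
    m = m' ∧ n = n' := by
  have hm : m = m' := by
    rcases lt_trichotomy m m' with h | h | h
    · exfalso; nlinarith
    · exact h
    · exfalso; nlinarith
  subst hm
  exact ⟨rfl, by omega⟩

-- A's state advance preserves the closed form
lemma pvPair_step (i m n : Int) (hi : 0 ≤ i) (h : pvPair i = (m, n)) :
    pvPair (i + 1) = if n + 1 < m then (m, n + 1) else (m + 1, 1) := by
  have hc := pvPair_char i hi
  rw [h] at hc
  obtain ⟨hm2, hn1, hnm, heq⟩ := hc
  have hc' := pvPair_char (i + 1) (by omega)
  by_cases hb : n + 1 < m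
  · rw [if_pos hb]
    have := pvPair_uniq (i + 1) (pvPair (i+1)).1 (pvPair (i+1)).2 m (n+1)
      hc'.1 hc'.2.1 hc'.2.2.1 hc'.2.2.2 hm2 (by omega) hb (by nlinarith)
    have h1 := this.1
    have h2 := this.2
    ext <;> simp [h1, h2]
  · rw [if_neg hb]
    have hnm1 : n = m - 1 := by omega
    have := pvPair_uniq (i + 1) (pvPair (i+1)).1 (pvPair (i+1)).2 (m+1) 1
      hc'.1 hc'.2.1 hc'.2.2.1 hc'.2.2.2 (by omega) le_rfl (by omega) (by nlinarith)
    have h1 := this.1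
    have h2 := this.2
    ext <;> simp [h1, h2]

lemma pvPair_zero : pvPair 0 = (2, 1) := by decide

lemma pvALoop_eq (x : Int) : ∀ (f : Nat) (acc : List (Int × Int × Int × Int × Int)) (m n : Int),
    pvPair acc.length = (m, n) → x - acc.length ≤ f →
    pvALoop x f m n acc = acc ++ pvTail acc.length (x - acc.length).toNat := by
  intro f
  induction f with
  | zero =>
    intro acc m n _ hf
    have : (x - acc.length).toNat = 0 := by omega
    simp [pvALoop, this, pvTail]
  | succ f ih =>
    intro acc m n hpair hf
    rw [pvALoop]
    by_cases hc : (acc.length : Int) + 1 ≤ x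
    · rw [if_pos hc]
      have hcnt : (x - acc.length).toNat = (x - (acc.length + 1)).toNat + 1 := by omega
      have hlen : ((acc ++ [(m, n, 2*m*n, m*m - n*n, m*m + n*n)]).length : Int)
          = (acc.length : Int) + 1 := by simp
      have hstep := pvPair_step (acc.length) m n (by positivity) hpair
      have htail : pvTail (acc.length) (x - acc.length).toNat
          = pvTrip m n :: pvTail ((acc.length : Int) + 1) (x - (acc.length + 1)).toNat := by
        rw [hcnt, pvTail, hpair]
      by_cases hb : n + 1 < m
      · rw [if_pos hb]
        rw [ih _ m (n+1) (by rw [hlen, hstep, if_pos hb]) (by rw [hlen]; omega)]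
        rw [htail, hlen]
        simp [pvTrip]
      · rw [if_neg hb]
        rw [ih _ (m+1) 1 (by rw [hlen, hstep, if_neg hb]) (by rw [hlen]; omega)]
        rw [htail, hlen]
        simp [pvTrip]
    · rw [if_neg hc]
      have : (x - acc.length).toNat = 0 := by omega
      simp [this, pvTail]

lemma pvBLoop_eq (x : Int) : ∀ (f : Nat) (i : Int) (acc : List (Int × Int × Int × Int × Int)),
    0 ≤ i → x - i ≤ f →
    pvBLoop x f i acc = acc ++ pvTail i (x - i).toNat := by
  intro f
  induction f with
  | zero =>
    intro i acc _ hf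
    have : (x - i).toNat = 0 := by omega
    simp [pvBLoop, this, pvTail]
  | succ f ih =>
    intro i acc hi hf
    rw [pvBLoop]
    by_cases hc : i < x
    · rw [if_pos hc]
      have hcnt : (x - i).toNat = (x - (i + 1)).toNat + 1 := by omega
      rw [ih (i+1) _ (by omega) (by omega)]
      rw [hcnt, pvTail]
      simp only [pvPair, pvTrip]
      simp
    · rw [if_neg hc]
      have : (x - i).toNat = 0 := by omega
      simp [this, pvTail]

-- ===== VERDICT (by name: the statement is the Claim_ definition above) =====
theorem list_triplets_spec : Claim_equal_list_triplets := by
  intro x _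
  unfold Spec_list_triplets list_triplets list_triplets_alt
  have hA : pvALoop x x.toNat 2 1 [] = [] ++ pvTail 0 (x - 0).toNat := by
    have h0 : ((([] : List (Int × Int × Int × Int × Int)).length : Int)) = 0 := by simp
    have := pvALoop_eq x x.toNat [] 2 1 (by rw [h0]; exact pvPair_zero) (by rw [h0]; omega)
    simpa using this
  have hB : pvBLoop x x.toNat 0 [] = [] ++ pvTail 0 (x - 0).toNat :=
    pvBLoop_eq x x.toNat 0 [] le_rfl (by omega)
  rw [hA, hB]
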